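-- pv_equiv track=rewrite | github.com/akjagadish/meta-logic-concepts | dataset_iterators.py | generate_all_tertiary_features_of_max_size
-- ===== SOURCE A (Python) =====
-- def generate_all_tertiary_features_of_max_size(size):
--     features = {}
--
--     features[1] = [[0], [1], [2]]
--
--     for i in range(2, size+1):
--         features[i] = []
--         for elt in features[i-1]:
--             features[i].append([0] + elt)
--             features[i].append([1] + elt)
--             features[i].append([2] + elt)
--
--     return features
-- ===== SOURCE B (Python) =====
-- def generate_all_tertiary_features_of_max_size(size):
--     features = {1: [[0], [1], [2]]}
--     for i in range(2, size + 1):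
--         # row i directly: entry n is the base-3 digits of n, least significant first
--         features[i] = [[(n // 3 ** p) % 3 for p in range(i)] for n in range(3 ** i)]
--     return features
-- ===== Notes on version B (the rewrite author's own statement) =====
-- stated objective: alternative
-- what changed: Each row i is generated independently in closed form as the base-3 digit expansions (least significant digit first) of 0..3^i-1, instead of incrementally prepending 0/1/2 onto every sequence of the previous row.
import Mathlib
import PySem

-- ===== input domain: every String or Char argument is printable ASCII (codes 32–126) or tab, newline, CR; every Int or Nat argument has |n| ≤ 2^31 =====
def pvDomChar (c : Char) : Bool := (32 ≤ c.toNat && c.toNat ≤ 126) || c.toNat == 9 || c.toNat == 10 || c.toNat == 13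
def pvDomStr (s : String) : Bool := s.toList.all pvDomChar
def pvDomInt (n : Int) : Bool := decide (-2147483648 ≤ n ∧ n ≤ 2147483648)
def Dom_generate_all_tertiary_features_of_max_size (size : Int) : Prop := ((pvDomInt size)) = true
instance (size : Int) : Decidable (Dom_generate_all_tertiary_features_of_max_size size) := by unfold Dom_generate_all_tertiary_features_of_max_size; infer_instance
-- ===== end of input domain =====

-- B enumerates each row independently in closed form (base-3 digits of 0..3^i-1,
-- least significant digit first) instead of A's row-by-row prepending; same cost,
-- different algorithm (objective: alternative).

-- ===== PORT A =====
-- literal transliteration: the Python dict is a PySem.Dict, features[i].append(x)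
-- is modify i [] (· ++ [x]); features[i-1] always exists here, so getD (i-1) [] is exact
def generate_all_tertiary_features_of_max_size (size : Int) : List (Int × List (List Int)) :=
  let features : PySem.Dict Int (List (List Int)) :=
    PySem.Dict.empty.insert 1 [[0], [1], [2]]
  let features :=
    (PySem.List.pyRange 2 (size + 1) 1).foldl (fun d i =>
      let d := d.insert i []
      (d.getD (i - 1) []).foldl (fun d2 elt =>
        ((d2.modify i [] (· ++ [[0] ++ elt])).modify i [] (· ++ [[1] ++ elt])).modify i [] (· ++ [[2] ++ elt])) d)
      features
  features.items

-- ===== PORT B =====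
-- B's dict is built by inserting strictly increasing fresh keys, ported exactly as
-- an association-list append; n // 3**p and % 3 are PySem floor div / mod, and 3**p
-- with p ≥ 0 (p comes from range(i)) is 3 ^ p.toNat
def generate_all_tertiary_features_of_max_size_alt (size : Int) : List (Int × List (List Int)) :=
  let features : List (Int × List (List Int)) := [(1, [[0], [1], [2]])]
  (PySem.List.pyRange 2 (size + 1) 1).foldl (fun acc i =>
    acc ++ [(i,
      (PySem.List.pyRange 0 (3 ^ i.toNat) 1).map (fun n =>
        (PySem.List.pyRange 0 i 1).map (fun p =>
          PySem.Int.mod (PySem.Int.floordiv n (3 ^ p.toNat)) 3)))])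
    features

-- ===== PRECONDITION & SPEC =====
def Spec_generate_all_tertiary_features_of_max_size (size : Int) (out : List (Int × List (List Int))) : Prop := out = generate_all_tertiary_features_of_max_size_alt size
instance (size : Int) (out : List (Int × List (List Int))) : Decidable (Spec_generate_all_tertiary_features_of_max_size size out) := by unfold Spec_generate_all_tertiary_features_of_max_size; infer_instance

-- ===== CLAIM (what is proved, stated in full; the proofs are below) =====
def Claim_equal_generate_all_tertiary_features_of_max_size : Prop := ∀ (size : Int), Dom_generate_all_tertiary_features_of_max_size size → Spec_generate_all_tertiary_features_of_max_size size (generate_all_tertiary_features_of_max_size size)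

-- ===== LEMMAS AND PROOFS =====

-- all ternary sequences of length n in A's order (position 0 varies fastest)
def pvRow : Nat → List (List Int)
  | 0 => [[]]
  | n + 1 => (pvRow n).flatMap (fun e => [[0] ++ e, [1] ++ e, [2] ++ e])

theorem pvInner_getD (i : Int) (prev : List (List Int)) (d : PySem.Dict Int (List (List Int))) (j : Int) :
    (prev.foldl (fun d2 elt =>
        ((d2.modify i [] (· ++ [[0] ++ elt])).modify i [] (· ++ [[1] ++ elt])).modify i [] (· ++ [[2] ++ elt])) d).getD j []
    = if j = i then d.getD i [] ++ prev.flatMap (fun e => [[0] ++ e, [1] ++ e, [2] ++ e]) else d.getD j [] := by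
  induction prev generalizing d with
  | nil => simp only [List.foldl_nil, List.flatMap_nil, List.append_nil]; split_ifs with h <;> simp [h]
  | cons e t ih =>
    simp only [List.foldl_cons, ih, PySem.Dict.getD_modify, List.flatMap_cons]
    split_ifs <;> simp

theorem pvInner_keys (i : Int) (prev : List (List Int)) (d : PySem.Dict Int (List (List Int)))
    (hd : d.contains i = true) :
    (prev.foldl (fun d2 elt =>
        ((d2.modify i [] (· ++ [[0] ++ elt])).modify i [] (· ++ [[1] ++ elt])).modify i [] (· ++ [[2] ++ elt])) d).keys
    = d.keys := by
  induction prev generalizing d with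
  | nil => rfl
  | cons e t ih =>
    rw [List.foldl_cons, ih]
    · rw [PySem.Dict.keys_modify, PySem.Dict.keys_insert_of_contains,
        PySem.Dict.keys_modify, PySem.Dict.keys_insert_of_contains,
        PySem.Dict.keys_modify, PySem.Dict.keys_insert_of_contains] <;>
        simp [PySem.Dict.contains_modify, hd]
    · simp [PySem.Dict.contains_modify, hd]

theorem pvLoopA (n : Nat) :
    ((PySem.List.pyRange 2 (2 + (n : Int)) 1).foldl (fun d i =>
      let d := d.insert i ([] : List (List Int))
      (d.getD (i - 1) []).foldl (fun d2 elt =>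
        ((d2.modify i [] (· ++ [[0] ++ elt])).modify i [] (· ++ [[1] ++ elt])).modify i [] (· ++ [[2] ++ elt])) d)
      (PySem.Dict.empty.insert 1 [[0], [1], [2]])).keys = PySem.List.pyRange 1 (2 + (n : Int)) 1
    ∧ ∀ j : Int,
      ((PySem.List.pyRange 2 (2 + (n : Int)) 1).foldl (fun d i =>
        let d := d.insert i ([] : List (List Int))
        (d.getD (i - 1) []).foldl (fun d2 elt =>
          ((d2.modify i [] (· ++ [[0] ++ elt])).modify i [] (· ++ [[1] ++ elt])).modify i [] (· ++ [[2] ++ elt])) d)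
        (PySem.Dict.empty.insert 1 [[0], [1], [2]])).getD j []
      = if 1 ≤ j ∧ j < 2 + (n : Int) then pvRow j.toNat else [] := by
  induction n with
  | zero =>
    refine ⟨by decide, fun j => ?_⟩
    have h0 : PySem.List.pyRange 2 (2 + ((0 : Nat) : Int)) 1 = [] := by decide
    rw [h0, List.foldl_nil, PySem.Dict.getD_insert]
    split_ifs with h1 h2 h2
    · subst h1; decide
    · exfalso; push_cast at h2; omega
    · exfalso; push_cast at h2; omega
    · simp [PySem.Dict.getD_empty]
  | succ n ih =>
    obtain ⟨hk, hg⟩ := ih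
    have hrange : PySem.List.pyRange 2 (2 + ((n+1 : Nat) : Int)) 1 = PySem.List.pyRange 2 (2 + (n : Int)) 1 ++ [2 + (n : Int)] := by
      have : (2 + ((n+1 : Nat) : Int)) = (2 + (n : Int)) + 1 := by push_cast; ring
      rw [this, PySem.List.pyRange_one_succ_right (by omega)]
    rw [hrange, List.foldl_append, List.foldl_cons, List.foldl_nil]
    set D := ((PySem.List.pyRange 2 (2 + (n : Int)) 1).foldl (fun d i =>
        let d := d.insert i ([] : List (List Int))
        (d.getD (i - 1) []).foldl (fun d2 elt =>
          ((d2.modify i [] (· ++ [[0] ++ elt])).modify i [] (· ++ [[1] ++ elt])).modify i [] (· ++ [[2] ++ elt])) d)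
        (PySem.Dict.empty.insert 1 [[0], [1], [2]])) with hD
    have hnotmem : D.contains (2 + (n : Int)) = false := by
      rw [PySem.Dict.contains_eq_decide_mem_keys, hk]
      simp [PySem.List.mem_pyRange_one]
    have hprev : (D.insert (2 + (n : Int)) ([] : List (List Int))).getD (2 + (n : Int) - 1) [] = pvRow (n + 1) := by
      rw [PySem.Dict.getD_insert]
      rw [if_neg (by omega)]
      rw [hg]
      rw [if_pos (by constructor <;> omega)]
      congr 1
      omega
    constructor
    · rw [pvInner_keys _ _ _ (by simp)]
      rw [PySem.Dict.keys_insert_of_not_contains _ _ hnotmem, hk]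
      have : (2 + ((n+1 : Nat) : Int)) = (2 + (n : Int)) + 1 := by push_cast; ring
      rw [this, PySem.List.pyRange_one_succ_right (by omega)]
    · intro j
      rw [pvInner_getD, hprev]
      by_cases h1 : j = 2 + (n : Int)
      · subst h1
        rw [if_pos rfl, PySem.Dict.getD_insert, if_pos rfl, List.nil_append,
          if_pos (by push_cast; omega)]
        have h2 : ((2 : Int) + (n : Int)).toNat = n + 2 := by omega
        rw [h2]
        rfl
      · rw [if_neg h1, PySem.Dict.getD_insert, if_neg h1, hg]
        by_cases h3 : 1 ≤ j ∧ j < 2 + (n : Int)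
        · rw [if_pos h3, if_pos (by push_cast; omega)]
        · rw [if_neg h3, if_neg (by push_cast at h3 ⊢; omega)]

theorem pvRange_mul3 (k : Nat) :
    List.range (3 * k) = (List.range k).flatMap (fun q => [3 * q, 3 * q + 1, 3 * q + 2]) := by
  induction k with
  | zero => rfl
  | succ k ih =>
    have h : 3 * (k + 1) = (3 * k + 1) + 1 + 1 := by omega
    rw [h, List.range_succ, List.range_succ, List.range_succ, ih, List.range_succ]
    simp

theorem pvDigits_step (q r m : Nat) (hr : r < 3) :
    (List.range (m + 1)).map (fun p => (((3 * q + r) / 3 ^ p % 3 : Nat) : Int))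
      = (r : Int) :: (List.range m).map (fun p => ((q / 3 ^ p % 3 : Nat) : Int)) := by
  rw [List.range_succ_eq_map, List.map_cons, List.map_map]
  congr 1
  · simp [Nat.mod_eq_of_lt hr]
  · apply List.map_congr_left
    intro p _
    simp only [Function.comp]
    congr 2
    rw [pow_succ', ← Nat.div_div_eq_div_mul]
    congr 1
    omega

theorem pvRow_digits (m : Nat) :
    pvRow m = (List.range (3 ^ m)).map (fun c => (List.range m).map (fun p => ((c / 3 ^ p % 3 : Nat) : Int))) := by
  induction m with
  | zero => simp [pvRow]
  | succ m ih =>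
    have hpow : 3 ^ (m + 1) = 3 * 3 ^ m := by ring
    rw [hpow, pvRange_mul3, List.map_flatMap]
    show pvRow (m + 1) = _
    rw [pvRow, ih, List.flatMap_map]
    congr 1
    funext q
    simp only [List.map_cons, List.map_nil]
    have h0 := pvDigits_step q 0 m (by omega)
    rw [Nat.add_zero] at h0
    rw [h0, pvDigits_step q 1 m (by omega), pvDigits_step q 2 m (by omega)]
    simp

theorem pvRowB (i : Int) (h1 : 1 ≤ i) :
    (PySem.List.pyRange 0 ((3 : Int) ^ i.toNat) 1).map (fun n =>
        (PySem.List.pyRange 0 i 1).map (fun p =>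
          PySem.Int.mod (PySem.Int.floordiv n ((3 : Int) ^ p.toNat)) 3)) = pvRow i.toNat := by
  obtain ⟨m, rfl⟩ : ∃ m : Nat, i = (m : Int) := ⟨i.toNat, (Int.toNat_of_nonneg (by omega)).symm⟩
  rw [Int.toNat_natCast]
  have hc : ((3 : Int) ^ m) = ((3 ^ m : Nat) : Int) := by push_cast; rfl
  rw [hc, PySem.List.pyRange_zero_natCast, PySem.List.pyRange_zero_natCast, List.map_map, pvRow_digits]
  apply List.map_congr_left
  intro c _
  simp only [Function.comp, List.map_map]
  apply List.map_congr_left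
  intro p _
  simp only [Function.comp, Int.toNat_natCast]
  rw [show ((3 : Int) ^ p) = ((3 ^ p : Nat) : Int) by push_cast; rfl, PySem.Int.floordiv_natCast,
    show (3 : Int) = ((3 : Nat) : Int) by norm_num, PySem.Int.mod_natCast]

-- ===== VERDICT (by name: the statement is the Claim_ definition above) =====
theorem generate_all_tertiary_features_of_max_size_spec : Claim_equal_generate_all_tertiary_features_of_max_size := by
  intro size _
  unfold Spec_generate_all_tertiary_features_of_max_size
  unfold generate_all_tertiary_features_of_max_size generate_all_tertiary_features_of_max_size_alt
  simp only []
  rw [PySem.List.foldl_append_singleton_eq_map]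
  by_cases hs : size ≤ 1
  · have hemp : PySem.List.pyRange 2 (size + 1) 1 = [] := by
      rw [PySem.List.pyRange_one]
      rw [show (size + 1 - 2).toNat = 0 by omega]
      rfl
    rw [hemp, List.foldl_nil, List.map_nil, List.append_nil]
    decide
  · set n : Nat := (size - 1).toNat with hn
    have heq : size + 1 = 2 + (n : Int) := by omega
    rw [heq]
    obtain ⟨hk, hg⟩ := pvLoopA n
    rw [PySem.Dict.items_eq_map_keys _ (by rw [hk]; exact PySem.List.nodup_pyRange_one _ _) [], hk]
    rw [PySem.List.pyRange_one_cons (a := 1) (by omega), List.map_cons]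
    congr 1
    · rw [hg, if_pos (by constructor <;> omega)]
      decide
    apply List.map_congr_left
    intro i hi
    rw [PySem.List.mem_pyRange_one] at hi
    rw [hg, if_pos (by omega), pvRowB i (by omega)]
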